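-- pv_equiv track=rewrite | github.com/mathics/Mathics | mathics/packages/KnotTheory/HFK-Zurich/fastPosi.py | isSimplePermComp
-- ===== SOURCE A (Python) =====
-- def isSimplePermComp(p1,p2,trans1,trans2,startx):##compute the size and whitney nb of a cycle of a perm
--     x=startx
--     y=p1[x]
--     whitney=0
--     compSize=1
--     if trans2[y]<trans1[y]: dy=1
--     else: dy=-1
--     while(1):
--         if p1[x]<p2[x]: dx=1
--         else: dx=-1
--         whitney-=dx*dy
--         if p1[x]==y: y=p2[x]
--         else: y=p1[x]
--         if trans2[y]<trans1[y]: dy=1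
--         else: dy=-1
--         whitney+=dx*dy
--         if trans1[y]==x: x=trans2[y]
--         else: x=trans1[y]
--         if x==startx:break
--         compSize+=1
--     return (whitney,compSize)
-- ===== SOURCE B (Python) =====
-- def isSimplePermComp(p1, p2, trans1, trans2, startx):
--     # Phase 1: walk the cycle once, collecting the visited x-nodes and the
--     # y-edge chosen at each node, until x returns to startx.
--     xs = []
--     ys = []
--     x = startx
--     y = p1[startx]
--     while True:
--         xs.append(x)
--         y = p2[x] if p1[x] == y else p1[x]
--         ys.append(y)
--         x = trans2[y] if trans1[y] == x else trans1[y]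
--         if x == startx:
--             break
--     # Phase 2: sum the telescoped whitney contributions over the collected steps.
--     whitney = 0
--     prev = 1 if trans2[p1[startx]] < trans1[p1[startx]] else -1
--     for xi, yi in zip(xs, ys):
--         dx = 1 if p1[xi] < p2[xi] else -1
--         dy = 1 if trans2[yi] < trans1[yi] else -1
--         whitney += dx * (dy - prev)
--         prev = dy
--     return (whitney, len(xs))
-- ===== Notes on version B (the rewrite author's own statement) =====
-- stated objective: alternative
-- what changed: B separates the work into two differently-shaped passes: one while-loop that only walks the cycle collecting the visited x-nodes and chosen y-edges, then a for-loop over the collected pairs summing the telescoped whitney contributions dx*(dy-prev), instead of A's single fused loop threading whitney, dy and compSize together; Pre_ excludes exactly the inputs on which the walk dereferences an out-of-range index (A raises IndexError there).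
import Mathlib
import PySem

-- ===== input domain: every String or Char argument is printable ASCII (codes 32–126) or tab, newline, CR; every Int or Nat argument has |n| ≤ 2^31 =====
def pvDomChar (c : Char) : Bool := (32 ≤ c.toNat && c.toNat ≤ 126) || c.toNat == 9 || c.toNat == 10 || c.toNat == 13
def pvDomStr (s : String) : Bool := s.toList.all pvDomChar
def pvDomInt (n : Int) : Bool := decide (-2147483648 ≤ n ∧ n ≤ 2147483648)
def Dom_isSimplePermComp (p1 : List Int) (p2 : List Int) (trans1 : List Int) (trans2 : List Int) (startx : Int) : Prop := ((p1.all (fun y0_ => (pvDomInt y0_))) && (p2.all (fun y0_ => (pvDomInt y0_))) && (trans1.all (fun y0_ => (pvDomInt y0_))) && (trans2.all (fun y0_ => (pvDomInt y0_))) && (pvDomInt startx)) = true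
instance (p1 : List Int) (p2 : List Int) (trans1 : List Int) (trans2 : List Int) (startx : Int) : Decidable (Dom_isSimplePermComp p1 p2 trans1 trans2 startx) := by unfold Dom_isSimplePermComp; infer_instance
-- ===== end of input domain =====

-- B replaces A's single fused loop (threading whitney, dy and compSize together) by two
-- differently-shaped passes: a walk collecting the cycle's (x-node, chosen y-edge) pairs, then a
-- fold over those pairs summing the telescoped whitney contributions (objective: alternative
-- decomposition; same cost).  Both Python loops are 'while True' walks, so both ports carry the
-- same fuel bound (the Pythons raise IndexError or never return on inputs that exhaust it, and
-- nothing is claimed about the Pythons there); A's fuel-out value is its current accumulator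
-- pair, B's walk closes with the current state as a final pair — the two fuel-out values agree,
-- so the ports are proved equal on every input.

-- shared total-indexing helper: l[i] with Python's negative-index rule (PySem.List.pyGetD)
def pvGet (l : List Int) (i : Int) : Int := PySem.List.pyGetD l i 0

-- fuel for the 'while True' walks (far above any returning Python run's iteration count)
def pvFuel (p1 : List Int) : Nat := (p1.length + 2) ^ 4

-- ===== PORT A =====
def loopA (p1 p2 trans1 trans2 : List Int) (startx : Int) :
    Nat → Int → Int → Int → Int → Int → Int × Int
  | 0, _, _, _, whitney, compSize => (whitney, compSize)
  | fuel+1, x, y, dy, whitney, compSize =>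
    let dx : Int := if pvGet p1 x < pvGet p2 x then 1 else -1
    let w1 := whitney - dx * dy
    let y' := if pvGet p1 x = y then pvGet p2 x else pvGet p1 x
    let dy' : Int := if pvGet trans2 y' < pvGet trans1 y' then 1 else -1
    let w2 := w1 + dx * dy'
    let x' := if pvGet trans1 y' = x then pvGet trans2 y' else pvGet trans1 y'
    if x' = startx then (w2, compSize)
    else loopA p1 p2 trans1 trans2 startx fuel x' y' dy' w2 (compSize + 1)

def isSimplePermComp (p1 : List Int) (p2 : List Int) (trans1 : List Int) (trans2 : List Int) (startx : Int) : Int × Int :=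
  let y := pvGet p1 startx
  let dy : Int := if pvGet trans2 y < pvGet trans1 y then 1 else -1
  loopA p1 p2 trans1 trans2 startx (pvFuel p1) startx y dy 0 1

-- ===== PORT B =====
-- phase 1: walk the cycle collecting (x-node, chosen y-edge) pairs
-- (fuel-out base case: close the walk with the current state as a final pair)
def walkB (p1 p2 trans1 trans2 : List Int) (startx : Int) :
    Nat → Int → Int → List (Int × Int)
  | 0, x, y => [(x, y)]
  | fuel+1, x, y =>
    let y' := if pvGet p1 x = y then pvGet p2 x else pvGet p1 x
    let x' := if pvGet trans1 y' = x then pvGet trans2 y' else pvGet trans1 y'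
    (x, y') :: (if x' = startx then [] else walkB p1 p2 trans1 trans2 startx fuel x' y')

-- phase 2: sum the telescoped whitney contributions over the collected pairs
def sumB (p1 p2 trans1 trans2 : List Int) : List (Int × Int) → Int → Int → Int
  | [], _, whitney => whitney
  | (xi, yi) :: rest, prev, whitney =>
    let dx : Int := if pvGet p1 xi < pvGet p2 xi then 1 else -1
    let dy : Int := if pvGet trans2 yi < pvGet trans1 yi then 1 else -1
    sumB p1 p2 trans1 trans2 rest dy (whitney + dx * (dy - prev))

def isSimplePermComp_alt (p1 : List Int) (p2 : List Int) (trans1 : List Int) (trans2 : List Int) (startx : Int) : Int × Int :=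
  let steps := walkB p1 p2 trans1 trans2 startx (pvFuel p1) startx (pvGet p1 startx)
  let prev0 : Int := if pvGet trans2 (pvGet p1 startx) < pvGet trans1 (pvGet p1 startx) then 1 else -1
  (sumB p1 p2 trans1 trans2 steps prev0 0, (steps.length : Int))

-- ===== PRECONDITION & SPEC =====
-- Whether A raises IndexError is genuinely trajectory-dependent (an out-of-range entry is
-- harmless unless the walk reaches it), so the exact exception-free domain has no closed form
-- over the entries alone.  Pre_ states it directly: the initial accesses are in range and the
-- walk dereferences only in-range (possibly negative) Python indices up to the ports' iteration
-- budget, checked by pvSafe, which stops at the first return of x to startx exactly as A does.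
def pvIdxOK (v : Int) (l : List Int) : Prop := -(l.length : Int) ≤ v ∧ v < (l.length : Int)

def pvIdxOKb (v : Int) (l : List Int) : Bool :=
  decide (-(l.length : Int) ≤ v) && decide (v < (l.length : Int))

-- the y-edge chosen and the state reached by one iteration of the walk, as used by both Pythons
def stepY (p1 p2 : List Int) (s : Int × Int) : Int :=
  if pvGet p1 s.1 = s.2 then pvGet p2 s.1 else pvGet p1 s.1

def stepS (p1 p2 trans1 trans2 : List Int) (s : Int × Int) : Int × Int :=
  (if pvGet trans1 (stepY p1 p2 s) = s.1 then pvGet trans2 (stepY p1 p2 s)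
   else pvGet trans1 (stepY p1 p2 s), stepY p1 p2 s)

-- the indices one iteration dereferences are in range
def pvStepOK (p1 p2 trans1 trans2 : List Int) (s : Int × Int) : Bool :=
  pvIdxOKb s.1 p1 && pvIdxOKb s.1 p2 && pvIdxOKb (stepY p1 p2 s) trans1 && pvIdxOKb (stepY p1 p2 s) trans2

def pvSafe (p1 p2 trans1 trans2 : List Int) (sx : Int) : Nat → Int × Int → Bool
  | 0, _ => true
  | n+1, s => pvStepOK p1 p2 trans1 trans2 s && (((stepS p1 p2 trans1 trans2 s).1 == sx) || pvSafe p1 p2 trans1 trans2 sx n (stepS p1 p2 trans1 trans2 s))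

def Pre_isSimplePermComp (p1 : List Int) (p2 : List Int) (trans1 : List Int) (trans2 : List Int) (startx : Int) : Prop :=
  pvIdxOK startx p1 ∧ pvIdxOK (pvGet p1 startx) trans1 ∧ pvIdxOK (pvGet p1 startx) trans2 ∧
  pvSafe p1 p2 trans1 trans2 startx (pvFuel p1) (startx, pvGet p1 startx) = true
instance (p1 : List Int) (p2 : List Int) (trans1 : List Int) (trans2 : List Int) (startx : Int) : Decidable (Pre_isSimplePermComp p1 p2 trans1 trans2 startx) := by unfold Pre_isSimplePermComp pvIdxOK; infer_instance

def pvWitness_isSimplePermComp : List Int × List Int × List Int × List Int × Int := ([1, 0], [0, 1], [1, 0], [0, 1], 0)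

def Spec_isSimplePermComp (p1 : List Int) (p2 : List Int) (trans1 : List Int) (trans2 : List Int) (startx : Int) (out : Int × Int) : Prop := out = isSimplePermComp_alt p1 p2 trans1 trans2 startx
instance (p1 : List Int) (p2 : List Int) (trans1 : List Int) (trans2 : List Int) (startx : Int) (out : Int × Int) : Decidable (Spec_isSimplePermComp p1 p2 trans1 trans2 startx out) := by unfold Spec_isSimplePermComp; infer_instance

-- ===== CLAIM (what is proved, stated in full; the proofs are below) =====
def Claim_equal_isSimplePermComp : Prop := ∀ (p1 : List Int) (p2 : List Int) (trans1 : List Int) (trans2 : List Int) (startx : Int), Dom_isSimplePermComp p1 p2 trans1 trans2 startx → Pre_isSimplePermComp p1 p2 trans1 trans2 startx → Spec_isSimplePermComp p1 p2 trans1 trans2 startx (isSimplePermComp p1 p2 trans1 trans2 startx)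

-- ===== LEMMAS AND PROOFS =====

-- A's per-iteration dy, as a function of the current edge
def dyOf (trans1 trans2 : List Int) (y : Int) : Int :=
  if pvGet trans2 y < pvGet trans1 y then 1 else -1

-- the loop invariant: A's fused loop equals B's walk followed by B's telescoped sum.
-- (In the fuel-out case the walk's closing pair (x, y) contributes dx * (dyOf y - dyOf y) = 0
-- to the sum and 1 to the length, matching A's fuel-out accumulator pair exactly.)
theorem loopA_eq_walk (p1 p2 trans1 trans2 : List Int) (startx : Int) :
    ∀ (f : Nat) (x y w c : Int),
      loopA p1 p2 trans1 trans2 startx f x y (dyOf trans1 trans2 y) w c =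
        (sumB p1 p2 trans1 trans2 (walkB p1 p2 trans1 trans2 startx f x y) (dyOf trans1 trans2 y) w,
         c - 1 + (walkB p1 p2 trans1 trans2 startx f x y).length) := by
  intro f
  induction f with
  | zero =>
    intro x y w c
    simp only [dyOf, loopA, walkB, sumB, List.length_cons, List.length_nil, Prod.mk.injEq]
    refine ⟨by ring, by norm_num⟩
  | succ f ih =>
    intro x y w c
    simp only [dyOf] at ih ⊢
    simp only [loopA, walkB]
    by_cases hx :
        (if pvGet trans1 (if pvGet p1 x = y then pvGet p2 x else pvGet p1 x) = x
          then pvGet trans2 (if pvGet p1 x = y then pvGet p2 x else pvGet p1 x)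
          else pvGet trans1 (if pvGet p1 x = y then pvGet p2 x else pvGet p1 x)) = startx
    · simp only [hx, if_true, sumB, List.length_cons, List.length_nil, Prod.mk.injEq]
      refine ⟨by ring, by norm_num⟩
    · simp only [if_neg hx]
      rw [ih _ _ _ (c + 1)]
      simp only [sumB, List.length_cons, Prod.mk.injEq]
      refine ⟨by congr 1; ring, by push_cast; ring⟩

-- ===== VERDICT (by name: the statement is the Claim_ definition above) =====
theorem isSimplePermComp_spec : Claim_equal_isSimplePermComp := by
  intro p1 p2 trans1 trans2 startx _hdom _hpre
  unfold Spec_isSimplePermComp isSimplePermComp isSimplePermComp_alt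
  have h := loopA_eq_walk p1 p2 trans1 trans2 startx (pvFuel p1) startx (pvGet p1 startx) 0 1
  simp only [dyOf] at h
  rw [h]
  norm_num
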